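-- pv_equiv track=rewrite | github.com/Oliviaaaaa-Feng/Huffman-Visualizer | stanford_compression_library-main/app.py | _default_symbols
-- ===== SOURCE A (Python) =====
-- from typing import List, Dict
--
-- def _default_symbols(n: int) -> List[str]:
--     """Generate default symbol labels: A..Z, A1..Z1, ..."""
--     base = [chr(c) for c in range(ord("A"), ord("Z") + 1)]
--     out: List[str] = []
--     suf = 0
--     while len(out) < n:
--         for ch in base:
--             out.append(ch if suf == 0 else f"{ch}{suf}")
--             if len(out) == n:
--                 break
--         suf += 1
--     return out
-- ===== SOURCE B (Python) =====
-- from typing import List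
--
-- def _default_symbols(n: int) -> List[str]:
--     """Generate default symbol labels: A..Z, A1..Z1, ..."""
--     def label(i: int) -> str:
--         suf, r = divmod(i, 26)
--         ch = chr(ord("A") + r)
--         return ch if suf == 0 else f"{ch}{suf}"
--     return [label(i) for i in range(n)]
-- ===== Notes on version B (the rewrite author's own statement) =====
-- stated objective: simpler
-- what changed: Replaces the while-loop with a running suffix counter plus an inner alphabet loop with a break by a single comprehension over range(n) that computes each label directly from its index with divmod(i, 26).
import Mathlib
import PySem

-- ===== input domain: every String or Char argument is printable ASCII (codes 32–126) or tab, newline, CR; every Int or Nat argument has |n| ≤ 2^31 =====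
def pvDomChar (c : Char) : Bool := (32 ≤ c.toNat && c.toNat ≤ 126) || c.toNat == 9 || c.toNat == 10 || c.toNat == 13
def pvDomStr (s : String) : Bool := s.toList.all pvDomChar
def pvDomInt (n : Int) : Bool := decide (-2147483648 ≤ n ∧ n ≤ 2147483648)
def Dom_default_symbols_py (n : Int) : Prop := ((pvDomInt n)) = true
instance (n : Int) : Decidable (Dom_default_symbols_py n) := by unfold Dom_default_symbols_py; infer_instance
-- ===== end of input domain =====

-- B replaces A's suffix-counter while-loop with inner alphabet loop and break by a
-- single comprehension over range(n) computing each label from its index via divmod (simpler).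

-- ===== PORT A =====
-- base = [chr(c) for c in range(ord("A"), ord("Z") + 1)]
def pvBaseA : List Char := (PySem.List.pyRange 65 91 1).map (fun c => Char.ofNat c.toNat)

-- ch if suf == 0 else f"{ch}{suf}"
def pvCellA (ch : Char) (suf : Int) : String :=
  if suf == 0 then String.ofList [ch] else String.ofList ([ch] ++ PySem.Int.toChars suf)

-- the inner 'for ch in base: out.append(...); if len(out) == n: break'
def pvInnerA (n suf : Int) : List Char → List String → List String
  | [], out => out
  | ch :: rest, out =>
    let out' := out ++ [pvCellA ch suf]
    if (out'.length : Int) == n then out' else pvInnerA n suf rest out'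

-- termination facts for the outer while-loop (the port cites them in decreasing_by)
lemma pvInnerA_length_le (n suf : Int) : ∀ (bs : List Char) (out : List String),
    out.length ≤ (pvInnerA n suf bs out).length := by
  intro bs
  induction bs with
  | nil => intro out; simp [pvInnerA]
  | cons ch rest ih =>
    intro out
    simp only [pvInnerA]
    split
    · simp
    · exact le_trans (by simp) (ih (out ++ [pvCellA ch suf]))

lemma pvInnerA_length_lt (n suf : Int) (ch : Char) (rest : List Char) (out : List String) :
    out.length + 1 ≤ (pvInnerA n suf (ch :: rest) out).length := by
  simp only [pvInnerA]
  split
  · simp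
  · exact le_trans (by simp) (pvInnerA_length_le n suf rest (out ++ [pvCellA ch suf]))

-- the 'while len(out) < n' loop
def pvOuterA (n : Int) (out : List String) (suf : Int) : List String :=
  if (out.length : Int) < n then
    pvOuterA n (pvInnerA n suf pvBaseA out) (suf + 1)
  else out
termination_by (n - out.length).toNat
decreasing_by
  have h1 : out.length + 1 ≤ (pvInnerA n suf pvBaseA out).length :=
    pvInnerA_length_lt n suf 'A' _ out
  omega

def default_symbols_py (n : Int) : List String := pvOuterA n [] 0

-- ===== PORT B =====
-- suf, r = divmod(i, 26); ch = chr(ord("A") + r); ch if suf == 0 else f"{ch}{suf}"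
def pvLabelB (i : Int) : String :=
  let suf := PySem.Int.floordiv i 26
  let r := PySem.Int.mod i 26
  let ch := Char.ofNat (65 + r.toNat)
  if suf == 0 then String.ofList [ch] else String.ofList ([ch] ++ PySem.Int.toChars suf)

def default_symbols_py_alt (n : Int) : List String :=
  (PySem.List.pyRange 0 n 1).map pvLabelB

-- ===== PRECONDITION & SPEC =====
def Spec_default_symbols_py (n : Int) (out : List String) : Prop := out = default_symbols_py_alt n
instance (n : Int) (out : List String) : Decidable (Spec_default_symbols_py n out) := by unfold Spec_default_symbols_py; infer_instance

-- ===== CLAIM (what is proved, stated in full; the proofs are below) =====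
def Claim_equal_default_symbols_py : Prop := ∀ (n : Int), Dom_default_symbols_py n → Spec_default_symbols_py n (default_symbols_py n)

-- ===== LEMMAS AND PROOFS =====

-- B's label at index 26*s+j (j < 26) is exactly A's cell for alphabet letter j with suffix s
lemma pvLabelB_eq_cell (s j : Nat) (hj : j < 26) :
    pvLabelB ((26 * s + j : Nat) : Int) = pvCellA (pvBaseA.getD j 'A') (s : Int) := by
  have hdiv : PySem.Int.floordiv ((26 * s + j : Nat) : Int) 26 = ((s : Nat) : Int) := by
    rw [show ((26 : Int)) = ((26 : Nat) : Int) from rfl, PySem.Int.floordiv_natCast]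
    congr 1
    omega
  have hmod : PySem.Int.mod ((26 * s + j : Nat) : Int) 26 = ((j : Nat) : Int) := by
    rw [show ((26 : Int)) = ((26 : Nat) : Int) from rfl, PySem.Int.mod_natCast]
    congr 1
    omega
  have hch : Char.ofNat (65 + ((j : Int)).toNat) = pvBaseA.getD j 'A' := by
    have ht : ((j : Int)).toNat = j := by omega
    have hall : ∀ k : Nat, k < 26 → Char.ofNat (65 + k) = pvBaseA.getD k 'A' := by decide
    rw [ht]
    exact hall j hj
  simp only [pvLabelB, pvCellA, hdiv, hmod, hch]

-- the inner for-loop appends cells for a prefix of the remaining alphabet, stopping at length n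
lemma pvInnerA_spec (n suf : Int) : ∀ (bs : List Char) (out : List String),
    (out.length : Int) < n →
    pvInnerA n suf bs out =
      out ++ (bs.take (n.toNat - out.length)).map (fun ch => pvCellA ch suf) := by
  intro bs
  induction bs with
  | nil => intro out _; simp [pvInnerA]
  | cons ch rest ih =>
    intro out hlt
    simp only [pvInnerA]
    split
    · rename_i hbrk
      have h1 : (out.length : Int) + 1 = n := by
        simpa [beq_iff_eq] using hbrk
      have h2 : n.toNat - out.length = 1 := by omega
      simp [h2]
    · rename_i hbrk
      have hne : (out.length : Int) + 1 ≠ n := by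
        simpa [beq_iff_eq] using hbrk
      have hlt' : ((out ++ [pvCellA ch suf]).length : Int) < n := by
        simp only [List.length_append, List.length_cons, List.length_nil]
        push_cast
        omega
      rw [ih _ hlt']
      have hk : n.toNat - out.length = (n.toNat - (out ++ [pvCellA ch suf]).length) + 1 := by
        simp only [List.length_append, List.length_cons, List.length_nil]
        omega
      rw [hk]
      simp

-- one chunk of B's output: labels 26*s .. min(26*(s+1), N) - 1 are A's cells for suffix s
lemma chunk_eq (s : Nat) (N : Nat) (h : 26 * s < N) :
    (pvBaseA.take (N - 26 * s)).map (fun ch => pvCellA ch (s : Int)) =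
      ((List.range (min (26 * (s + 1)) N - 26 * s)).map (fun j => 26 * s + j)).map
        (fun m => pvLabelB ((m : Nat) : Int)) := by
  have hlenB : pvBaseA.length = 26 := by decide
  apply List.ext_getElem
  · simp [hlenB]
    omega
  · intro j hj1 hj2
    simp only [List.length_map, List.length_take, hlenB] at hj1
    have hj26 : j < 26 := by omega
    simp only [List.getElem_map, List.getElem_take, List.getElem_range]
    rw [pvLabelB_eq_cell s j hj26]
    congr 1
    rw [List.getD_eq_getElem pvBaseA 'A' (by omega)]

-- the outer while-loop, from a state holding the first min(26*s, N) labels, produces all N labels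
lemma pvOuterA_spec (n : Int) : ∀ (d : Nat) (s : Nat),
    n.toNat ≤ 26 * s + d →
    pvOuterA n ((List.range (min (26 * s) n.toNat)).map (fun m => pvLabelB ((m : Nat) : Int))) (s : Int)
      = (List.range n.toNat).map (fun m => pvLabelB ((m : Nat) : Int)) := by
  intro d
  induction d with
  | zero =>
    intro s hs
    rw [pvOuterA]
    have hmin : min (26 * s) n.toNat = n.toNat := by omega
    rw [hmin]
    have hguard : ¬ ((((List.range n.toNat).map (fun m => pvLabelB ((m : Nat) : Int))).length : Int) < n) := by
      simp only [List.length_map, List.length_range]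
      omega
    simp only [if_neg hguard]
  | succ d ih =>
    intro s hs
    rw [pvOuterA]
    by_cases hguard : (((List.range (min (26 * s) n.toNat)).map (fun m => pvLabelB ((m : Nat) : Int))).length : Int) < n
    · have hlen : ((List.range (min (26 * s) n.toNat)).map (fun m => pvLabelB ((m : Nat) : Int))).length
          = min (26 * s) n.toNat := by simp
      have h26s : 26 * s < n.toNat := by
        rw [hlen] at hguard; omega
      have hmin : min (26 * s) n.toNat = 26 * s := by omega
      rw [if_pos hguard]
      rw [pvInnerA_spec n (s : Int) pvBaseA _ hguard, hlen, hmin]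
      rw [chunk_eq s n.toNat h26s]
      rw [← List.map_append, ← List.range_add]
      have harith : 26 * s + (min (26 * (s + 1)) n.toNat - 26 * s) = min (26 * (s + 1)) n.toNat := by
        omega
      rw [harith]
      have := ih (s + 1) (by omega)
      push_cast at this ⊢
      exact this
    · rw [if_neg hguard]
      have hlen : ((List.range (min (26 * s) n.toNat)).map (fun m => pvLabelB ((m : Nat) : Int))).length
          = min (26 * s) n.toNat := by simp
      have hmin : min (26 * s) n.toNat = n.toNat := by
        rw [hlen] at hguard; omega
      rw [hmin]

-- ===== VERDICT (by name: the statement is the Claim_ definition above) =====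
theorem default_symbols_py_spec : Claim_equal_default_symbols_py := by
  intro n _
  unfold Spec_default_symbols_py default_symbols_py default_symbols_py_alt
  have h0 := pvOuterA_spec n n.toNat 0 (by omega)
  simp only [Nat.mul_zero, Nat.zero_min, List.range_zero, List.map_nil, Nat.cast_zero] at h0
  rw [h0, PySem.List.pyRange_one]
  simp
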